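-- pv_equiv track=rewrite | github.com/francocuervoo/ip | parciales/parcial_02/submission.py | longitud_mas_grande
-- ===== SOURCE A (Python) =====
-- def esta_incluido ( elemento : int, conjunto : list[int]) -> bool:
--     for elem in conjunto:
--         if elem == elemento:
--             return True
--     return False
--
-- def longitud_mas_grande(A: list[list[int]]) -> int:
--     lista_nueva : list[int] = []
--     mayor : int = 0
--
--     for a in A:
--         longitud = longitud_mas_larga_de_una_lista(a)
--         lista_nueva.append(longitud)
--
--     mayor = obtener_numero_mayor(lista_nueva)
--
--     return mayor
--
-- def longitud_mas_larga_de_una_lista ( lista_numeros : list[int]) -> int: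
--     res: int = 0
--     inicio_actual : int = 0
--     inicio_temporal: int = 0
--
--     if not (esta_incluido(1, lista_numeros)):
--         return res
--
--     for numero in lista_numeros:
--         if numero == 1 and inicio_actual == 0:
--             inicio_actual += 1
--         elif numero == 1 and inicio_actual != 0:
--             inicio_actual += 1
--         elif numero != 1:
--             if inicio_actual > inicio_temporal:
--                 inicio_temporal = inicio_actual
--             inicio_actual = 0
--         elif inicio_actual > inicio_temporal:
--             inicio_temporal = inicio_actual
--
--     if(inicio_actual > inicio_temporal):
--         inicio_temporal = inicio_actual
--
--     res = inicio_temporal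
--
--     return res
--
-- def obtener_numero_mayor ( lista_numeros : list[int] ) -> int:
--     mayor_parcial = lista_numeros[0]
--
--     for numero in lista_numeros:
--         if numero > mayor_parcial:
--             mayor_parcial = numero
--
--     return mayor_parcial
-- ===== SOURCE B (Python) =====
-- def longitud_mas_grande(A: list[list[int]]) -> int:
--     # Boundary-index method: the longest run of 1s in a sublist is the largest
--     # gap between consecutive non-1 positions (with virtual boundaries at -1 and len).
--     return max(_longitud_por_bordes(sub) for sub in A)
--
-- def _longitud_por_bordes(sub: list[int]) -> int:
--     best = 0
--     prev = -1  # index of the most recent element != 1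
--     for i, x in enumerate(sub):
--         if x != 1:
--             best = max(best, i - prev - 1)
--             prev = i
--     return max(best, len(sub) - prev - 1)
-- ===== Notes on version B (the rewrite author's own statement) =====
-- stated objective: simpler
-- what changed: Replaces A's membership pre-check plus run-counter state machine (and the build-a-list-then-rescan max) with a boundary-index scan: the longest run of 1s is the largest gap between consecutive non-1 positions, and the overall answer is a max over a generator.
import Mathlib
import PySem

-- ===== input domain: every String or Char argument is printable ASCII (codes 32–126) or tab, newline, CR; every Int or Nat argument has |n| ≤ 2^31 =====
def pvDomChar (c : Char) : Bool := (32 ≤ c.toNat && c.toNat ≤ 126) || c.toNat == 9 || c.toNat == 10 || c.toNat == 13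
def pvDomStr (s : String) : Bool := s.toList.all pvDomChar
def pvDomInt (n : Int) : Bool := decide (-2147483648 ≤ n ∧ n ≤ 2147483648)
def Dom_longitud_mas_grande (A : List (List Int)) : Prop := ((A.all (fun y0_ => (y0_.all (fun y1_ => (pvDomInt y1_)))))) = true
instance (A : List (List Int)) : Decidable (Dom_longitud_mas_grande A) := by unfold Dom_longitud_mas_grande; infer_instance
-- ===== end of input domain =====

-- B replaces A's membership pre-check + run-counter state machine by a boundary-index scan
-- (longest gap between non-1 positions) and folds max over a generator instead of building a
-- list and rescanning it; objective: simpler.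

-- ===== PORT A =====
def esta_incluido (elemento : Int) (conjunto : List Int) : Bool :=
  match conjunto with
  | [] => false
  | elem :: rest => if elem == elemento then true else esta_incluido elemento rest

def longitud_mas_larga_de_una_lista (lista_numeros : List Int) : Int :=
  if !(esta_incluido 1 lista_numeros) then 0
  else
    let st := lista_numeros.foldl
      (fun (s : Int × Int) numero =>
        let inicio_actual := s.1
        let inicio_temporal := s.2
        if numero == 1 && inicio_actual == 0 then (inicio_actual + 1, inicio_temporal)
        else if numero == 1 && inicio_actual != 0 then (inicio_actual + 1, inicio_temporal)
        else if numero != 1 then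
          (0, if inicio_actual > inicio_temporal then inicio_actual else inicio_temporal)
        else (inicio_actual, if inicio_actual > inicio_temporal then inicio_actual else inicio_temporal))
      (0, 0)
    if st.1 > st.2 then st.1 else st.2

-- Python indexes lista_numeros[0]: raises IndexError on []; that case is outside Pre_ (A nonempty ⇒ argument nonempty)
def obtener_numero_mayor (lista_numeros : List Int) : Int :=
  match lista_numeros with
  | [] => 0
  | mayor_parcial :: _ =>
    lista_numeros.foldl (fun m numero => if numero > m then numero else m) mayor_parcial

def longitud_mas_grande (A : List (List Int)) : Int :=
  obtener_numero_mayor (A.map longitud_mas_larga_de_una_lista)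

-- ===== PORT B =====
def pvAltLongest (sub : List Int) : Int :=
  let st := (PySem.List.enumerate sub).foldl
    (fun (s : Int × Int) (p : Int × Int) =>
      if p.2 ≠ 1 then (max s.1 (p.1 - s.2 - 1), p.1) else s)
    (0, -1)
  max st.1 ((sub.length : Int) - st.2 - 1)

-- max over the generator: on empty A Python raises ValueError; outside Pre_
def longitud_mas_grande_alt (A : List (List Int)) : Int :=
  match A.map pvAltLongest with
  | [] => 0
  | h :: t => t.foldl max h

-- ===== PRECONDITION & SPEC =====
-- Pre_ excludes only the empty outer list, on which A raises IndexError (and B ValueError).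
def Pre_longitud_mas_grande (A : List (List Int)) : Prop := A ≠ []
instance (A : List (List Int)) : Decidable (Pre_longitud_mas_grande A) := by unfold Pre_longitud_mas_grande; infer_instance
def pvWitness_longitud_mas_grande : List (List Int) := [[1, 0, 1, 1], []]

def Spec_longitud_mas_grande (A : List (List Int)) (out : Int) : Prop := out = longitud_mas_grande_alt A
instance (A : List (List Int)) (out : Int) : Decidable (Spec_longitud_mas_grande A out) := by unfold Spec_longitud_mas_grande; infer_instance

-- ===== CLAIM (what is proved, stated in full; the proofs are below) =====
def Claim_equal_longitud_mas_grande : Prop := ∀ (A : List (List Int)), Dom_longitud_mas_grande A → Pre_longitud_mas_grande A → Spec_longitud_mas_grande A (longitud_mas_grande A)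

-- ===== LEMMAS AND PROOFS =====

-- A's state-machine step, named for induction
def stepA (s : Int × Int) (numero : Int) : Int × Int :=
  if numero == 1 && s.1 == 0 then (s.1 + 1, s.2)
  else if numero == 1 && s.1 != 0 then (s.1 + 1, s.2)
  else if numero != 1 then (0, if s.1 > s.2 then s.1 else s.2)
  else (s.1, if s.1 > s.2 then s.1 else s.2)

def stepB (s : Int × Int) (p : Int × Int) : Int × Int :=
  if p.2 ≠ 1 then (max s.1 (p.1 - s.2 - 1), p.1) else s

-- core invariant: A's (cur, best) state and B's (best, prev) state stay related
theorem scan_rel : ∀ (l : List Int) (i cur temp best prev : Int),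
    cur = i - prev - 1 → temp = best →
    (l.foldl stepA (cur, temp)) =
      (let sb := (PySem.List.enumerate l i).foldl stepB (best, prev)
       (i + l.length - sb.2 - 1, sb.1)) := by
  intro l
  induction l with
  | nil => intro i cur temp best prev h1 h2; simp [PySem.List.enumerate]; omega
  | cons x xs ih =>
    intro i cur temp best prev h1 h2
    rw [PySem.List.enumerate_cons]
    simp only [List.foldl_cons]
    by_cases hx : x = 1
    · have hA : stepA (cur, temp) x = (cur + 1, temp) := by
        simp only [stepA, hx]
        by_cases hc : cur = 0 <;> simp [hc]
      have hB : stepB (best, prev) (i, x) = (best, prev) := by simp [stepB, hx]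
      rw [hA, hB, ih (i + 1) (cur + 1) temp best prev (by omega) h2]
      simp only [List.length_cons]
      congr 1
      push_cast
      ring
    · have hA : stepA (cur, temp) x = (0, if cur > temp then cur else temp) := by
        simp [stepA, hx]
      have hB : stepB (best, prev) (i, x) = (max best (i - prev - 1), i) := by
        simp [stepB, hx]
      rw [hA, hB,
        ih (i + 1) 0 (if cur > temp then cur else temp) (max best (i - prev - 1)) i
          (by omega) (by subst h1 h2; split <;> omega)]
      simp only [List.length_cons]
      congr 1
      push_cast
      ring

theorem foldl_stepA_eq (l : List Int) :
    l.foldl (fun (s : Int × Int) numero =>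
        let inicio_actual := s.1
        let inicio_temporal := s.2
        if numero == 1 && inicio_actual == 0 then (inicio_actual + 1, inicio_temporal)
        else if numero == 1 && inicio_actual != 0 then (inicio_actual + 1, inicio_temporal)
        else if numero != 1 then
          (0, if inicio_actual > inicio_temporal then inicio_actual else inicio_temporal)
        else (inicio_actual, if inicio_actual > inicio_temporal then inicio_actual else inicio_temporal))
      (0, 0) = l.foldl stepA (0, 0) := rfl

theorem foldl_stepB_eq (l : List Int) :
    (PySem.List.enumerate l).foldl
      (fun (s : Int × Int) (p : Int × Int) =>
        if p.2 ≠ 1 then (max s.1 (p.1 - s.2 - 1), p.1) else s)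
      (0, -1) = (PySem.List.enumerate l).foldl stepB (0, -1) := rfl

-- if 1 is not in the list, A's state machine never starts a run: its scan yields (0, 0)
theorem scan_no_one : ∀ (l : List Int), esta_incluido 1 l = false →
    l.foldl stepA (0, 0) = (0, 0) := by
  intro l
  induction l with
  | nil => intro _; rfl
  | cons x xs ih =>
    intro h
    simp only [esta_incluido] at h
    by_cases hx : x = 1
    · simp [hx] at h
    · have hs : stepA (0, 0) x = (0, 0) := by simp [stepA, hx]
      rw [List.foldl_cons, hs]
      exact ih (by simpa [hx] using h)

-- per-sublist equality: A's helper = B's boundary-index helper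
theorem sublist_eq (l : List Int) : longitud_mas_larga_de_una_lista l = pvAltLongest l := by
  have hrel := scan_rel l 0 0 0 0 (-1) (by omega) rfl
  unfold longitud_mas_larga_de_una_lista pvAltLongest
  rw [foldl_stepA_eq, foldl_stepB_eq]
  by_cases hinc : esta_incluido 1 l
  · simp only [hinc, Bool.not_true, Bool.false_eq_true, if_false]
    rw [hrel]
    simp only []
    split <;> omega
  · simp only [Bool.not_eq_true] at hinc
    rw [hinc]
    rw [scan_no_one l hinc] at hrel
    simp only [Bool.not_false, if_true]
    have := hrel.symm
    -- from (0,0) = (len - sb.2 - 1, sb.1): sb.1 = 0 and len - sb.2 - 1 = 0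
    have h1 : ((0 : Int), (0 : Int)).1 = (0 : Int) + l.length - ((PySem.List.enumerate l 0).foldl stepB (0, -1)).2 - 1 := by rw [hrel]
    have h2 : ((0 : Int), (0 : Int)).2 = ((PySem.List.enumerate l 0).foldl stepB (0, -1)).1 := by rw [hrel]
    simp only [] at h1 h2
    rw [max_def]
    split <;> omega

-- max over a nonempty list: A's find-max loop equals B's fold of max
theorem max_eq : ∀ (h : Int) (t : List Int),
    (h :: t).foldl (fun m numero => if numero > m then numero else m) h = t.foldl max h := by
  intro h t
  have : ∀ (acc : Int) (t : List Int),
      t.foldl (fun m numero => if numero > m then numero else m) acc = t.foldl max acc := by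
    intro acc t'
    induction t' generalizing acc with
    | nil => rfl
    | cons y ys ih => simp only [List.foldl_cons, ih]; congr 1; rw [max_def]; split <;> split <;> omega
  simp only [List.foldl_cons, this]
  congr 1
  simp

-- ===== VERDICT (by name: the statement is the Claim_ definition above) =====
theorem longitud_mas_grande_spec : Claim_equal_longitud_mas_grande := by
  intro A _ hpre
  unfold Spec_longitud_mas_grande longitud_mas_grande longitud_mas_grande_alt obtener_numero_mayor
  have hmap : A.map longitud_mas_larga_de_una_lista = A.map pvAltLongest :=
    List.map_congr_left (fun a _ => sublist_eq a)
  cases A with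
  | nil => exact absurd rfl hpre
  | cons a as =>
    simp only [hmap, List.map_cons]
    exact max_eq _ _
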